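-- pv_equiv track=rewrite | github.com/cherrymanu/dla-dc-segmentation | dla/src/xycut.py | valleys_to_split_indices
-- ===== SOURCE A (Python) =====
-- from typing import List, Tuple
--
-- def valleys_to_split_indices(valleys: List[Tuple[int, int]],
--                              dimension: int,
--                              min_size: int) -> List[Tuple[int, int]]:
--     """
--     Convert valleys to split indices (regions to keep).
--
--     Args:
--         valleys: List of (start, end) valley positions
--         dimension: Total dimension (width or height)
--         min_size: Minimum region size
--
--     Returns:
--         List of (start, end) for content regions (between valleys)
--     """
--     if not valleys:
--         return [(0, dimension)]
--
--     splits = []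
--     current = 0
--
--     for valley_start, valley_end in valleys:
--         # Content region before this valley
--         if valley_start - current >= min_size:
--             splits.append((current, valley_start))
--         current = valley_end
--
--     # Content region after last valley
--     if dimension - current >= min_size:
--         splits.append((current, dimension))
--
--     # If no valid splits, return whole region
--     if not splits:
--         return [(0, dimension)]
--
--     return splits
-- ===== SOURCE B (Python) =====
-- from typing import List, Tuple
--
-- def valleys_to_split_indices(valleys: List[Tuple[int, int]],
--                              dimension: int,
--                              min_size: int) -> List[Tuple[int, int]]:
--     if not valleys:
--         return [(0, dimension)]
--     # Flatten everything into one alternating boundary stream: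
--     # [0, vs1, ve1, vs2, ve2, ..., vsn, ven, dimension].
--     # Content regions are exactly the consecutive pairs taken two at a time.
--     bounds = [0] + [b for v in valleys for b in v] + [dimension]
--
--     def chunk(bs: List[int]) -> List[Tuple[int, int]]:
--         if not bs:
--             return []
--         s, e = bs[0], bs[1]
--         rest = chunk(bs[2:])
--         return [(s, e)] + rest if e - s >= min_size else rest
--
--     regions = chunk(bounds)
--     return regions if regions else [(0, dimension)]
-- ===== Notes on version B (the rewrite author's own statement) =====
-- stated objective: alternative
-- what changed: Instead of threading a running cursor over (start,end) pairs, B flattens the input into one alternating boundary stream [0, vs1, ve1, ..., vsn, ven, dimension] and recursively consumes that stream two elements at a time, keeping each pair whose span meets min_size.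
import Mathlib
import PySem

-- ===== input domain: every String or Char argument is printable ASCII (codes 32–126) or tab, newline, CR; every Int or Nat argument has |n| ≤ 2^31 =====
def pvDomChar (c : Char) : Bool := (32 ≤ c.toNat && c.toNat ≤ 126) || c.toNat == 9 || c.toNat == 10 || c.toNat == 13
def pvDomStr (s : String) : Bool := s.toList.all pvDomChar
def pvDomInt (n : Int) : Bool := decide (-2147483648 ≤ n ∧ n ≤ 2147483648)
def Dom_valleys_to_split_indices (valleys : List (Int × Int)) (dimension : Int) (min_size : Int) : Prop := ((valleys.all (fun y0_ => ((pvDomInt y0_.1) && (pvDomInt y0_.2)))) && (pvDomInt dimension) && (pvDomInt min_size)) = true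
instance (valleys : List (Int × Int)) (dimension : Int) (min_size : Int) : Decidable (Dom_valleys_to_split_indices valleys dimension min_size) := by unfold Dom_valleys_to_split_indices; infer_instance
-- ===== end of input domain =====

-- B replaces A's cursor-threading loop over pairs by flattening the input into one
-- alternating boundary stream consumed recursively two elements at a time (alternative decomposition).

-- ===== PORT A =====
-- A threads a running cursor through the valley list.
def valleys_to_split_indices (valleys : List (Int × Int)) (dimension : Int) (min_size : Int) : List (Int × Int) :=
  if valleys = [] then [(0, dimension)]
  else
    let st := valleys.foldl
      (fun (acc : List (Int × Int) × Int) v =>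
        (if v.1 - acc.2 ≥ min_size then acc.1 ++ [(acc.2, v.1)] else acc.1, v.2))
      ([], 0)
    let splits := if dimension - st.2 ≥ min_size then st.1 ++ [(st.2, dimension)] else st.1
    if splits = [] then [(0, dimension)] else splits

-- ===== PORT B =====
-- B's recursive chunker: consume the boundary stream two elements at a time.
-- (The one-element case is a totality guard: Source B's chunk is only ever applied to
-- even-length lists, where Python's bs[1] always exists.)
def chunkPairs (min_size : Int) : List Int → List (Int × Int)
  | [] => []
  | [_] => []
  | s :: e :: rest =>
    if e - s ≥ min_size then (s, e) :: chunkPairs min_size rest else chunkPairs min_size rest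

def valleys_to_split_indices_alt (valleys : List (Int × Int)) (dimension : Int) (min_size : Int) : List (Int × Int) :=
  if valleys = [] then [(0, dimension)]
  else
    let bounds := 0 :: (valleys.flatMap (fun v => [v.1, v.2]) ++ [dimension])
    let regions := chunkPairs min_size bounds
    if regions = [] then [(0, dimension)] else regions

-- ===== PRECONDITION & SPEC =====
def Spec_valleys_to_split_indices (valleys : List (Int × Int)) (dimension : Int) (min_size : Int) (out : List (Int × Int)) : Prop := out = valleys_to_split_indices_alt valleys dimension min_size
instance (valleys : List (Int × Int)) (dimension : Int) (min_size : Int) (out : List (Int × Int)) : Decidable (Spec_valleys_to_split_indices valleys dimension min_size out) := by unfold Spec_valleys_to_split_indices; infer_instance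

-- ===== CLAIM (what is proved, stated in full; the proofs are below) =====
def Claim_equal_valleys_to_split_indices : Prop := ∀ (valleys : List (Int × Int)) (dimension : Int) (min_size : Int), Dom_valleys_to_split_indices valleys dimension min_size → Spec_valleys_to_split_indices valleys dimension min_size (valleys_to_split_indices valleys dimension min_size)

-- ===== LEMMAS AND PROOFS =====
-- Loop invariant: A's fold with initial state (acc, c) plus the trailing append
-- equals acc ++ the chunked boundary stream starting at cursor c.
theorem vtsi_fold_eq_chunk (dimension min_size : Int) :
    ∀ (valleys : List (Int × Int)) (acc : List (Int × Int)) (c : Int),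
      (let st := valleys.foldl
        (fun (a : List (Int × Int) × Int) v =>
          (if v.1 - a.2 ≥ min_size then a.1 ++ [(a.2, v.1)] else a.1, v.2)) (acc, c)
       if dimension - st.2 ≥ min_size then st.1 ++ [(st.2, dimension)] else st.1)
      = acc ++ chunkPairs min_size (c :: (valleys.flatMap (fun v => [v.1, v.2]) ++ [dimension])) := by
  intro valleys
  induction valleys with
  | nil =>
    intro acc c
    simp only [List.foldl, List.flatMap_nil, List.nil_append, chunkPairs]
    by_cases h : dimension - c ≥ min_size <;> simp [h]
  | cons v vs ih =>
    intro acc c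
    simp only [List.foldl, List.flatMap_cons, List.cons_append, List.append_assoc, chunkPairs]
    by_cases h : v.1 - c ≥ min_size
    · simpa [h] using ih (acc ++ [(c, v.1)]) v.2
    · simpa [h] using ih acc v.2

-- ===== VERDICT (by name: the statement is the Claim_ definition above) =====
theorem valleys_to_split_indices_spec : Claim_equal_valleys_to_split_indices := by
  intro valleys dimension min_size _
  unfold Spec_valleys_to_split_indices valleys_to_split_indices valleys_to_split_indices_alt
  by_cases hv : valleys = []
  · simp [hv]
  · have h := vtsi_fold_eq_chunk dimension min_size valleys [] 0
    simp only [List.nil_append] at h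
    simp only [hv, ite_false, h]
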